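-- pv_equiv track=rewrite | github.com/Ryan-L-N/CY105 | CommonCodingProblem1.py | is_anagram
-- ===== SOURCE A (Python) =====
-- def is_anagram(string1,string2):
--     letter_count = 0
--     for letter in string1:
--         for another_letter in string2:
--             if letter == another_letter:
--                 letter_count += 1
--                 break
--     if letter_count == len(string2):
--         return True
--     else:
--         return False
-- ===== SOURCE B (Python) =====
-- def is_anagram(string1, string2):
--     total = 0
--     for ch in set(string2):
--         total += string1.count(ch)
--     return total == len(string2)
-- ===== Notes on version B (the rewrite author's own statement) =====
-- stated objective: alternative
-- what changed: Instead of scanning string1 position-by-position with an inner break-scan of string2, B loops over the distinct characters of string2 and sums string1.count(ch); string1 is never traversed element-wise by the main loop.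
import Mathlib
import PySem

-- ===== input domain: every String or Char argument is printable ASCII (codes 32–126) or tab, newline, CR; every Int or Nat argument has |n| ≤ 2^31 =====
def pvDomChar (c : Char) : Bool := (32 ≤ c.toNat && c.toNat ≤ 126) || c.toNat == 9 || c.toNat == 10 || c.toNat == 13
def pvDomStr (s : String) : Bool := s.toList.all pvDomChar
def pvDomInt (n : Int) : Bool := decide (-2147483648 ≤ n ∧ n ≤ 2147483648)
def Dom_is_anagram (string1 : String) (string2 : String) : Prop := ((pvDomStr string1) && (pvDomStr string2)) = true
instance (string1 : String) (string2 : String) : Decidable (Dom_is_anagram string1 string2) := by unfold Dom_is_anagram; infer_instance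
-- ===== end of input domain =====

-- B inverts the traversal: instead of A's nested position-by-position scan of string1,
-- it loops over the distinct characters of string2 and sums string1.count(ch) (alternative decomposition).

-- ===== PORT A =====
-- inner 'for another_letter in string2: if letter == another_letter: letter_count += 1; break'
def isAnagramInner (letter : Char) (s2 : List Char) (count : Int) : Int :=
  match s2 with
  | [] => count
  | a :: rest => if letter == a then count + 1 else isAnagramInner letter rest count

def is_anagram (string1 : String) (string2 : String) : Bool :=
  let letter_count :=
    string1.toList.foldl (fun acc letter => isAnagramInner letter string2.toList acc) (0 : Int)
  if letter_count == PySem.Str.len string2 then true else false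

-- ===== PORT B =====
-- 'for ch in set(string2): total += string1.count(ch)' — the sum is iteration-order independent,
-- so folding over PySem.Set.ofList is exact; string1.count(ch) for a single character ch is List.count.
def is_anagram_alt (string1 : String) (string2 : String) : Bool :=
  let total :=
    (PySem.Set.ofList string2.toList).foldl
      (fun acc ch => acc + (string1.toList.count ch : Int)) (0 : Int)
  total == PySem.Str.len string2

-- ===== PRECONDITION & SPEC =====
def Spec_is_anagram (string1 : String) (string2 : String) (out : Bool) : Prop := out = is_anagram_alt string1 string2
instance (string1 : String) (string2 : String) (out : Bool) : Decidable (Spec_is_anagram string1 string2 out) := by unfold Spec_is_anagram; infer_instance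

-- ===== CLAIM (what is proved, stated in full; the proofs are below) =====
def Claim_equal_is_anagram : Prop := ∀ (string1 : String) (string2 : String), Dom_is_anagram string1 string2 → Spec_is_anagram string1 string2 (is_anagram string1 string2)

-- ===== LEMMAS AND PROOFS =====

-- the inner break-loop counts 1 iff letter occurs in s2
theorem isAnagramInner_eq (letter : Char) (s2 : List Char) (c : Int) :
    isAnagramInner letter s2 c = if letter ∈ s2 then c + 1 else c := by
  induction s2 with
  | nil => simp [isAnagramInner]
  | cons a rest ih =>
      simp only [isAnagramInner, List.mem_cons]
      by_cases h : letter = a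
      · simp [h]
      · simp [h, ih]

-- A's accumulator is the number of positions of s1 whose char occurs in s2
theorem foldl_inner_eq_countP (s1 s2 : List Char) (a : Int) :
    s1.foldl (fun acc letter => isAnagramInner letter s2 acc) a
      = a + (s1.countP (fun x => decide (x ∈ s2)) : Int) := by
  induction s1 generalizing a with
  | nil => simp
  | cons x rest ih =>
      rw [List.foldl_cons, isAnagramInner_eq, ih, List.countP_cons]
      by_cases h : x ∈ s2 <;> simp [h] <;> omega

-- on a Nodup list, the one-hot selector sums to 1 iff x is in the list
theorem sum_one_hot (ks : List Char) (x : Char) (hnd : ks.Nodup) :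
    (ks.map (fun k => if x = k then (1 : Int) else 0)).sum
      = if x ∈ ks then (1 : Int) else 0 := by
  induction ks with
  | nil => simp
  | cons k rest ih =>
      obtain ⟨hk, hrest⟩ := List.nodup_cons.mp hnd
      simp only [List.map_cons, List.sum_cons, List.mem_cons, ih hrest]
      rcases eq_or_ne x k with rfl | hne
      · simp [fun h => hk h]
      · simp [hne]

-- summing per-character counts of s1 over the distinct characters of s2
-- equals the number of positions of s1 whose char occurs in s2
theorem sum_counts_eq_countP (ks s1 s2 : List Char)
    (hnd : ks.Nodup) (hiff : ∀ x, x ∈ ks ↔ x ∈ s2) :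
    (ks.map (fun k => (s1.count k : Int))).sum
      = (s1.countP (fun x => decide (x ∈ s2)) : Int) := by
  induction s1 with
  | nil => simp
  | cons x rest ih =>
      have hmap : ks.map (fun k => ((x :: rest).count k : Int))
          = ks.map (fun k => (rest.count k : Int) + (if x = k then (1 : Int) else 0)) := by
        apply List.map_congr_left
        intro k _
        rcases eq_or_ne x k with rfl | hne
        · simp [List.count_cons]
        · simp [List.count_cons, hne, Ne.symm hne]
      rw [hmap, PySem.List.sum_map_add_int, ih, sum_one_hot ks x hnd, List.countP_cons]
      by_cases h : x ∈ s2
      · simp [h, (hiff x).mpr h]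
      · have : x ∉ ks := fun hk => h ((hiff x).mp hk)
        simp [h, this]

-- ===== VERDICT (by name: the statement is the Claim_ definition above) =====
theorem is_anagram_spec : Claim_equal_is_anagram := by
  intro string1 string2 _
  unfold Spec_is_anagram is_anagram is_anagram_alt
  dsimp only
  rw [PySem.List.foldl_add, foldl_inner_eq_countP,
      sum_counts_eq_countP (PySem.Set.ofList string2.toList) string1.toList string2.toList
        (PySem.Set.nodup_ofList _) (fun x => PySem.Set.mem_ofList _ _)]
  by_cases h : List.countP (fun x => decide (x ∈ string2.toList)) string1.toList = string2.length
  · simp [h]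
  · simp [h, PySem.Str.len]
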